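-- pv_equiv track=rewrite | github.com/shakthi-natarajan/Python_Programming | Sand_Hourglass pattern.py | generate_sandglass
-- ===== SOURCE A (Python) =====
-- def generate_sandglass(n):
--     list1=[]
--     max=2*n-1
--     counter=max
--     for i in range(n,0,-1):
--         spaces=(max-counter)//2
--         string1=' '*spaces+ '*'*counter+ ' '*spaces
--         list1.append(string1)
--         counter-=2
--
--     list2=list1[::]
--     list1.reverse()
--     list1.pop(0)
--     list1=list2+list1
--     return list1
-- ===== SOURCE B (Python) =====
-- def generate_sandglass(n):
--     rows = []
--     for i in range(2 * n - 1):
--         d = abs(i - (n - 1))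
--         pad = ' ' * (n - 1 - d)
--         rows.append(pad + '*' * (2 * d + 1) + pad)
--     return rows
-- ===== Notes on version B (the rewrite author's own statement) =====
-- stated objective: simpler
-- what changed: One distance-from-center pass over all 2n-1 rows replaces building the top half, copying, reversing and popping the middle row.
import Mathlib
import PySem

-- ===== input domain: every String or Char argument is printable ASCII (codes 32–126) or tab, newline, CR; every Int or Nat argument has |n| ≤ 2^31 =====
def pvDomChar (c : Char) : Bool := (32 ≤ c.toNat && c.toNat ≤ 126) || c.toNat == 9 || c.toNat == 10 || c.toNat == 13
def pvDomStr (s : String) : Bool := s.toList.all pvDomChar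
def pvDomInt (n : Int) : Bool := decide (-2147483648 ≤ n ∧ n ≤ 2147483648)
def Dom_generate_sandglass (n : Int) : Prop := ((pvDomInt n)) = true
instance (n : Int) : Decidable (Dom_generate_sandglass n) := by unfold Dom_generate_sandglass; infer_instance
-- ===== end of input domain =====

-- B builds each of the 2n-1 rows directly from its distance to the center row, instead of
-- A's build-top-half / copy / reverse / pop-the-middle; same cost, simpler (objective: simpler).

-- ===== PORT A =====
-- pop(0) raises IndexError on the empty list (n ≤ 0); those inputs are excluded by Pre_,
-- so on admitted inputs pop(0) is exactly 'drop 1'.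
def generate_sandglass (n : Int) : List String :=
  let mx : Int := 2 * n - 1
  let st :=
    (PySem.List.pyRange n 0 (-1)).foldl
      (fun (s : List String × Int) _i =>
        let spaces := PySem.Int.floordiv (mx - s.2) 2
        let string1 := String.ofList
          (PySem.List.pyRepeat [' '] spaces ++ PySem.List.pyRepeat ['*'] s.2 ++
            PySem.List.pyRepeat [' '] spaces)
        (s.1 ++ [string1], s.2 - 2))
      ([], mx)
  let list1 := st.1
  let list2 := list1
  let list1r := list1.reverse
  let list1p := list1r.drop 1
  list2 ++ list1p

-- ===== PORT B =====
def generate_sandglass_alt (n : Int) : List String :=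
  (PySem.List.pyRange 0 (2 * n - 1) 1).foldl
    (fun rows i =>
      let d := |i - (n - 1)|
      let pad := PySem.List.pyRepeat [' '] (n - 1 - d)
      rows ++ [String.ofList (pad ++ PySem.List.pyRepeat ['*'] (2 * d + 1) ++ pad)])
    []

-- ===== PRECONDITION & SPEC =====
-- Pre_ excludes exactly n ≤ 0, where A raises IndexError (pop(0) on an empty list).
def Pre_generate_sandglass (n : Int) : Prop := 1 ≤ n
instance (n : Int) : Decidable (Pre_generate_sandglass n) := by
  unfold Pre_generate_sandglass; infer_instance

def pvWitness_generate_sandglass : Int := 3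

def Spec_generate_sandglass (n : Int) (out : List String) : Prop :=
  out = generate_sandglass_alt n
instance (n : Int) (out : List String) : Decidable (Spec_generate_sandglass n out) := by
  unfold Spec_generate_sandglass; infer_instance

-- ===== CLAIM (what is proved, stated in full; the proofs are below) =====
def Claim_equal_generate_sandglass : Prop :=
  ∀ (n : Int), Dom_generate_sandglass n → Pre_generate_sandglass n →
    Spec_generate_sandglass n (generate_sandglass n)

-- ===== LEMMAS AND PROOFS =====

/-- A row: `pad` spaces, `stars` stars, `pad` spaces. -/
def sgRow (pad stars : Nat) : String :=
  String.ofList (List.replicate pad ' ' ++ List.replicate stars '*' ++ List.replicate pad ' ')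

/-- The row A's loop body builds from the current counter `c` (with `mx` fixed). -/
def sgRowA (mx c : Int) : String :=
  String.ofList
    (PySem.List.pyRepeat [' '] (PySem.Int.floordiv (mx - c) 2) ++
      PySem.List.pyRepeat ['*'] c ++
      PySem.List.pyRepeat [' '] (PySem.Int.floordiv (mx - c) 2))

/-- A's loop ignores the loop variable: its list component is a map over the iteration count. -/
lemma sgLoopA (mx : Int) (l : List Int) (acc : List String) (c : Int) :
    (l.foldl
      (fun (s : List String × Int) _i =>
        let spaces := PySem.Int.floordiv (mx - s.2) 2
        let string1 := String.ofList
          (PySem.List.pyRepeat [' '] spaces ++ PySem.List.pyRepeat ['*'] s.2 ++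
            PySem.List.pyRepeat [' '] spaces)
        (s.1 ++ [string1], s.2 - 2))
      (acc, c)).1
    = acc ++ (List.range l.length).map (fun j : Nat => sgRowA mx (c - 2 * (j : Int))) := by
  induction l generalizing acc c with
  | nil => simp
  | cons x t ih =>
      simp only [List.foldl_cons]
      rw [ih, List.length_cons, List.range_succ_eq_map, List.map_cons, List.map_map]
      simp only [Nat.cast_zero, mul_zero, sub_zero, List.append_assoc, List.singleton_append]
      congr 1
      congr 1
      · unfold sgRowA
        simp [List.append_assoc]
      · apply List.map_congr_left
        intro j _
        simp only [Function.comp_apply]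
        congr 1
        push_cast
        ring

lemma sgRowA_eq (m j : Nat) (hj : j < m) :
    sgRowA (2 * (m : Int) - 1) ((2 * (m : Int) - 1) - 2 * (j : Int))
      = sgRow j (2 * (m - j) - 1) := by
  unfold sgRowA sgRow
  have h1 : (2 * (m : Int) - 1) - ((2 * (m : Int) - 1) - 2 * (j : Int)) = 2 * (j : Int) := by ring
  rw [h1]
  have h2 : PySem.Int.floordiv (2 * (j : Int)) 2 = (j : Int) := by
    rw [PySem.Int.floordiv_eq_ediv_of_pos (by norm_num)]; omega
  rw [h2]
  simp only [PySem.List.pyRepeat_singleton]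
  have e1 : ((j : Int)).toNat = j := by omega
  have e2 : ((2 * (m : Int) - 1) - 2 * (j : Int)).toNat = 2 * (m - j) - 1 := by omega
  rw [e1, e2]

/-- B's row at index `k` (for `1 ≤ m`, `k < 2*m-1`) in `sgRow` form. -/
lemma sgRowB_eq (m k : Nat) (hm : 1 ≤ m) (_hk : k < 2 * m - 1) :
    String.ofList
      (PySem.List.pyRepeat [' '] ((m : Int) - 1 - |(k : Int) - ((m : Int) - 1)|) ++
        PySem.List.pyRepeat ['*'] (2 * |(k : Int) - ((m : Int) - 1)| + 1) ++
        PySem.List.pyRepeat [' '] ((m : Int) - 1 - |(k : Int) - ((m : Int) - 1)|))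
      = sgRow (m - 1 - ((m - 1 - k) + (k - (m - 1)))) (2 * ((m - 1 - k) + (k - (m - 1))) + 1) := by
  set d : Nat := (m - 1 - k) + (k - (m - 1)) with hd
  have habs : |(k : Int) - ((m : Int) - 1)| = (d : Int) := by
    rcases le_total (k : Int) ((m : Int) - 1) with h | h
    · rw [abs_of_nonpos (by omega)]; omega
    · rw [abs_of_nonneg (by omega)]; omega
  rw [habs]
  unfold sgRow
  simp only [PySem.List.pyRepeat_singleton]
  have e1 : ((m : Int) - 1 - (d : Int)).toNat = m - 1 - d := by omega
  have e2 : (2 * (d : Int) + 1).toNat = 2 * d + 1 := by omega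
  rw [e1, e2]

lemma sandglass_eq (n : Int) (hn : 1 ≤ n) :
    generate_sandglass n = generate_sandglass_alt n := by
  obtain ⟨m, rfl⟩ : ∃ m : Nat, n = (m : Int) := ⟨n.toNat, by omega⟩
  have hm : 1 ≤ m := by exact_mod_cast hn
  -- A side
  simp only [generate_sandglass]
  rw [sgLoopA]
  have hlen : (PySem.List.pyRange (m : Int) 0 (-1)).length = m := by
    rw [PySem.List.pyRange_neg_one]; simp
  rw [hlen]
  have hA : (List.range m).map (fun j : Nat => sgRowA (2 * (m : Int) - 1) ((2 * (m : Int) - 1) - 2 * (j : Int)))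
      = (List.range m).map (fun j => sgRow j (2 * (m - j) - 1)) := by
    apply List.map_congr_left
    intro j hj
    exact sgRowA_eq m j (List.mem_range.mp hj)
  rw [hA]
  -- B side
  unfold generate_sandglass_alt
  rw [PySem.List.foldl_append_singleton_eq_map, PySem.List.pyRange_one]
  have h2m : (2 * (m : Int) - 1 - 0).toNat = 2 * m - 1 := by omega
  rw [h2m]
  rw [List.map_map]
  have hB : (List.range (2 * m - 1)).map
        ((fun i : Int =>
            String.ofList
              (PySem.List.pyRepeat [' '] ((m : Int) - 1 - |i - ((m : Int) - 1)|) ++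
                PySem.List.pyRepeat ['*'] (2 * |i - ((m : Int) - 1)| + 1) ++
                PySem.List.pyRepeat [' '] ((m : Int) - 1 - |i - ((m : Int) - 1)|))) ∘
          (fun k : Nat => (0 : Int) + k))
      = (List.range (2 * m - 1)).map (fun k =>
          sgRow (m - 1 - ((m - 1 - k) + (k - (m - 1)))) (2 * ((m - 1 - k) + (k - (m - 1))) + 1)) := by
    apply List.map_congr_left
    intro k hk
    simp only [Function.comp, zero_add]
    exact sgRowB_eq m k hm (List.mem_range.mp hk)
  rw [hB]
  -- elementwise comparison
  set L := (List.range m).map (fun j => sgRow j (2 * (m - j) - 1)) with hL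
  have hLlen : L.length = m := by simp [hL]
  apply List.ext_getElem
  · simp [hLlen]; omega
  · intro k h1 h2
    have hk : k < 2 * m - 1 := by simpa [hLlen] using h2
    simp only [List.nil_append, List.getElem_map, List.getElem_range]
    by_cases hkm : k < m
    · rw [List.getElem_append_left (by omega)]
      simp only [hL, List.getElem_map, List.getElem_range]
      congr 1 <;> omega
    · rw [List.getElem_append_right (by omega)]
      rw [List.getElem_drop, List.getElem_reverse]
      simp only [hL, List.getElem_map, List.getElem_range]
      congr 1 <;> simp <;> omega

-- ===== VERDICT (by name: the statement is the Claim_ definition above) =====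
theorem generate_sandglass_spec : Claim_equal_generate_sandglass := by
  intro n _ hpre
  unfold Spec_generate_sandglass
  exact sandglass_eq n hpre
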